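-- pv_equiv track=rewrite | github.com/acollino/Exercises | python-ds-practice/38_min_max_key_in_dictionary/min_max_key_in_dictionary.py | min_max_keys
-- ===== SOURCE A (Python) =====
-- def min_max_keys(d):
--     """Return tuple (min-keys, max-keys) in d.
--
--         >>> min_max_keys({2: 'a', 7: 'b', 1: 'c', 10: 'd', 4: 'e'})
--         (1, 10)
--
--     Works with any kind of key that can be compared, like strings:
--
--         >>> min_max_keys({"apple": "red", "cherry": "red", "berry": "blue"})
--         ('apple', 'cherry')
--     """
--     keys = list(d.keys())
--     min_key = keys[0]
--     max_key = keys[0]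
--     for key in keys:
--         if key < min_key:
--             min_key = key
--         if key > max_key:
--             max_key = key
--     return (min_key, max_key)
-- ===== SOURCE B (Python) =====
-- def min_max_keys(d):
--     sorted_keys = sorted(d)
--     return (sorted_keys[0], sorted_keys[-1])
-- ===== Notes on version B (the rewrite author's own statement) =====
-- stated objective: simpler
-- what changed: Replaces the manual running-min/running-max comparison loop with sorting the keys once and returning the first and last element of the sorted list.
import Mathlib
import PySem

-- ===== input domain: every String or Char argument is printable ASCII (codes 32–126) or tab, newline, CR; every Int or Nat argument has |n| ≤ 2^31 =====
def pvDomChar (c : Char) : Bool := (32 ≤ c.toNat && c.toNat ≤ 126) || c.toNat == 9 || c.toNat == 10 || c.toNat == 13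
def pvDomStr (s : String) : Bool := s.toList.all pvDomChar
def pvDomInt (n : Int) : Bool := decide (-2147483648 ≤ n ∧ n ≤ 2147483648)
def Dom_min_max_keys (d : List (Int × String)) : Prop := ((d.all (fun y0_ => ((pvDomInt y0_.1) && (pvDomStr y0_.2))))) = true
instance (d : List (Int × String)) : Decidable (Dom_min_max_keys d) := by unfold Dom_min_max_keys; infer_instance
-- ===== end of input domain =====

-- B replaces A's manual running-min/max loop with sort-the-keys-once and take the endpoints (simpler; not faster).


-- ===== PORT A =====
def min_max_keys (d : List (Int × String)) : Int × Int :=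
  let keys := PySem.List.dedup (d.map (·.1))
  match keys with
  | [] => (0, 0)  -- unreachable: Python raises IndexError on keys[0]; excluded by Pre_
  | k0 :: rest =>
    (k0 :: rest).foldl
      (fun mk key =>
        (if key < mk.1 then key else mk.1, if key > mk.2 then key else mk.2))
      (k0, k0)

-- ===== PORT B =====
def min_max_keys_alt (d : List (Int × String)) : Int × Int :=
  let sorted_keys := PySem.List.sorted (PySem.List.dedup (d.map (·.1))) (fun x => x)
  match sorted_keys with
  | [] => (0, 0)  -- unreachable: Python raises IndexError on sorted_keys[0]; excluded by Pre_
  | h :: t => (h, (h :: t).getLast (List.cons_ne_nil h t))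

-- ===== PRECONDITION & SPEC =====
-- Pre_ excludes only the empty dict, on which both A and B raise IndexError.
def Pre_min_max_keys (d : List (Int × String)) : Prop := d ≠ []
instance (d : List (Int × String)) : Decidable (Pre_min_max_keys d) := by unfold Pre_min_max_keys; infer_instance
def pvWitness_min_max_keys : (List (Int × String)) := [(2, "a"), (7, "b"), (1, "c")]
def Spec_min_max_keys (d : List (Int × String)) (out : Int × Int) : Prop := out = min_max_keys_alt d
instance (d : List (Int × String)) (out : Int × Int) : Decidable (Spec_min_max_keys d out) := by unfold Spec_min_max_keys; infer_instance

-- ===== CLAIM (what is proved, stated in full; the proofs are below) =====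
def Claim_equal_min_max_keys : Prop := ∀ (d : List (Int × String)), Dom_min_max_keys d → Pre_min_max_keys d → Spec_min_max_keys d (min_max_keys d)

-- ===== LEMMAS AND PROOFS =====

-- A's loop updates both components independently: the pair fold splits into two folds.
lemma pair_fold_split (l : List Int) (a b : Int) :
    l.foldl
      (fun mk key =>
        (if key < mk.1 then key else mk.1, if key > mk.2 then key else mk.2))
      (a, b)
    = (l.foldl (fun m k => if k < m then k else m) a,
       l.foldl (fun m k => if k > m then k else m) b) := by
  induction l generalizing a b with
  | nil => rfl
  | cons x xs ih => simp [List.foldl, ih]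

lemma if_lt_eq_min (m k : Int) : (if k < m then k else m) = min m k := by
  simp [min_def]; omega

lemma if_gt_eq_max (m k : Int) : (if k > m then k else m) = max m k := by
  simp [max_def]; omega

-- in a ≤-sorted list every element is ≤ the last one
lemma le_getLast_of_pairwise (l : List Int) (hp : l.Pairwise (· ≤ ·)) (h : l ≠ []) :
    ∀ x ∈ l, x ≤ l.getLast h := by
  induction l with
  | nil => exact absurd rfl h
  | cons y ys ih =>
    intro x hx
    rcases List.pairwise_cons.1 hp with ⟨hy, hys⟩
    cases ys with
    | nil => simp at hx; simp [hx]
    | cons z zs =>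
      rw [List.getLast_cons (List.cons_ne_nil z zs)]
      rcases List.mem_cons.1 hx with h1 | h2
      · subst h1
        exact le_trans (hy z (by simp))
          (ih hys (List.cons_ne_nil z zs) z (by simp))
      · exact ih hys (List.cons_ne_nil z zs) x h2

theorem min_max_keys_eq (d : List (Int × String)) (hd : d ≠ []) :
    min_max_keys d = min_max_keys_alt d := by
  unfold min_max_keys min_max_keys_alt
  set keys := PySem.List.dedup (d.map (·.1)) with hk
  have hkne : keys ≠ [] := by
    cases d with
    | nil => exact absurd rfl hd
    | cons p ps =>
      have hm : p.1 ∈ keys := by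
        rw [hk]; exact (PySem.List.mem_dedup _ _).2 (by simp)
      exact List.ne_nil_of_mem hm
  cases hkeq : keys with
  | nil => exact absurd hkeq hkne
  | cons k0 rest =>
    have hsne : PySem.List.sorted keys (fun x => x) ≠ [] := by
      rw [Ne, PySem.List.sorted_eq_nil_iff]; exact hkne
    cases hseq : PySem.List.sorted keys (fun x => x) with
    | nil => exact absurd hseq hsne
    | cons h t =>
      simp only [hkeq] at hseq ⊢
      rw [hseq]
      -- A's value as folds of min / max
      rw [pair_fold_split]
      have hmin : (k0 :: rest).foldl (fun m k => if k < m then k else m) k0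
          = rest.foldl min k0 := by
        simp only [if_lt_eq_min, List.foldl_cons, min_self]
      have hmax : (k0 :: rest).foldl (fun m k => if k > m then k else m) k0
          = rest.foldl max k0 := by
        simp only [if_gt_eq_max, List.foldl_cons, max_self]
      rw [hmin, hmax]
      have hminq : PySem.List.min? (k0 :: rest) (fun y => y) = some (rest.foldl min k0) :=
        PySem.List.min?_id_cons k0 rest
      have hmaxq : PySem.List.max? (k0 :: rest) (fun y => y) = some (rest.foldl max k0) :=
        PySem.List.max?_id_cons k0 rest
      have hmmem : rest.foldl min k0 ∈ k0 :: rest := PySem.List.min?_mem hminq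
      have hMmem : rest.foldl max k0 ∈ k0 :: rest := PySem.List.max?_mem hmaxq
      have hmismin : ∀ y ∈ k0 :: rest, rest.foldl min k0 ≤ y := by
        intro y hy; exact PySem.List.min?_isMin hminq y hy
      have hMismax : ∀ y ∈ k0 :: rest, y ≤ rest.foldl max k0 := by
        intro y hy; exact PySem.List.max?_isMax hmaxq y hy
      have hperm : (h :: t).Perm (k0 :: rest) := by
        rw [← hseq]; exact PySem.List.sorted_perm (k0 :: rest) (fun x => x) false
      have hpw : (h :: t).Pairwise (· ≤ ·) := by
        have := PySem.List.sorted_pairwise (xs := k0 :: rest) (key := fun x => x)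
        rwa [hseq] at this
      -- head = min
      have hhead : h = rest.foldl min k0 := by
        apply le_antisymm
        · exact PySem.List.key_head_sorted_le _ _ hseq _ hmmem
        · exact hmismin h (hperm.mem_iff.1 (by simp))
      -- last = max
      have hlast : (h :: t).getLast (List.cons_ne_nil h t) = rest.foldl max k0 := by
        apply le_antisymm
        · exact hMismax _ (hperm.mem_iff.1 (List.getLast_mem _))
        · exact le_getLast_of_pairwise _ hpw _ _ (hperm.mem_iff.2 hMmem)
      show (rest.foldl min k0, rest.foldl max k0) = (h, (h :: t).getLast (List.cons_ne_nil h t))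
      rw [Prod.mk.injEq]
      exact ⟨hhead.symm, hlast.symm⟩

-- ===== VERDICT (by name: the statement is the Claim_ definition above) =====
theorem min_max_keys_spec : Claim_equal_min_max_keys := by
  intro d _ hpre
  exact min_max_keys_eq d hpre
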